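-- pv_equiv track=rewrite | github.com/bopopescu/CS61A | Projects/cats/typing.py | swap_diff
-- ===== SOURCE A (Python) =====
-- def swap_diff(start, goal, limit):
--     """A diff function for autocorrect that determines how many letters
--     in START need to be substituted to create GOAL, then adds the difference in
--     their lengths.
--     """
--     # BEGIN PROBLEM 6
--     if len(start) == 1 or limit < 0:
--         if start[0] == goal[0]:
--             return 0
--         return 1
--     if len(start) != len(goal):
--         length, diff = min(len(start), len(goal)), abs(len(start) - len(goal))
--         return diff + swap_diff(start[:length], goal[:length], limit - diff)
--     else:
--         if start[0] == goal[0]: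
--             return swap_diff(start[1:], goal[1:], limit)
--         return 1 + swap_diff(start[1:], goal[1:], limit - 1)
-- ===== SOURCE B (Python) =====
-- def swap_diff(start, goal, limit):
--     """A diff function for autocorrect that determines how many letters
--     in START need to be substituted to create GOAL, then adds the difference in
--     their lengths.
--     """
--     if len(start) == 1 or limit < 0:
--         return 0 if start[0] == goal[0] else 1
--     m = min(len(start), len(goal))
--     acc = abs(len(start) - len(goal))
--     lim = limit - acc
--     i = 0
--     while i < m - 1 and lim >= 0:
--         if start[i] != goal[i]:
--             acc += 1
--             lim -= 1
--         i += 1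
--     return acc + (0 if start[i] == goal[i] else 1)
-- ===== Notes on version B (the rewrite author's own statement) =====
-- stated objective: faster
-- what changed: Replaces A's recursion with O(n) string slicing at every step by a single index-based loop over the common prefix that tracks the remaining limit and starts from the length difference, so no intermediate strings are built.
import Mathlib
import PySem

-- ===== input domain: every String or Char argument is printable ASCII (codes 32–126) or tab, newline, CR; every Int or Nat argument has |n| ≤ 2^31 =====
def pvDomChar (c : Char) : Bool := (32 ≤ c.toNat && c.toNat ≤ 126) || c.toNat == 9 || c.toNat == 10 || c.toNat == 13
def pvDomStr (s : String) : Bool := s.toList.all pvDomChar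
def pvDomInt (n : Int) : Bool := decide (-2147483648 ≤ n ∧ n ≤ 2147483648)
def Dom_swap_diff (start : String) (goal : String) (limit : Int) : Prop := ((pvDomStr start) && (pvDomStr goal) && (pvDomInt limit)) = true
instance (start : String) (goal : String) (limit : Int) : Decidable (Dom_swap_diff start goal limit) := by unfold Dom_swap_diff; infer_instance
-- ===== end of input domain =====

-- B replaces A's sliced recursion by one index-based loop over the common prefix (no slicing): asymptotically faster.

-- ===== PORT A =====
-- literal port of A's recursion on the code-point lists; s[0]/g[0] on an empty
-- string is Python's IndexError (excluded by Pre_), rendered here by the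
-- catch-all match arm returning 0.
def swapA (s g : List Char) (limit : Int) : Int :=
  if s.length = 1 ∨ limit < 0 then
    match s, g with
    | a :: _, b :: _ => if a = b then 0 else 1
    | _, _ => 0
  else if hne : s.length ≠ g.length then
    let m := min s.length g.length
    let d : Int := (((s.length : Int) - (g.length : Int)).natAbs : Int)
    d + swapA (PySem.List.slice s none (some (m : Int))) (PySem.List.slice g none (some (m : Int))) (limit - d)
  else
    match s, g with
    | a :: s', b :: g' =>
      if a = b then swapA s' g' limit
      else 1 + swapA s' g' (limit - 1)
    | _, _ => 0
termination_by s.length + g.length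
decreasing_by
  · simp only [PySem.List.slice_to_natCast, List.length_take]
    omega
  · simp only [List.length_cons]; omega
  · simp only [List.length_cons]; omega

def swap_diff (start : String) (goal : String) (limit : Int) : Int :=
  swapA start.toList goal.toList limit

-- ===== PORT B =====
-- loop of Source B: i runs while i < m-1 ∧ lim ≥ 0; rem = (m-1) - i. Index accesses
-- are always in range under Pre_ (i ≤ m-1 < min length), so List.getD's default
-- is never read there.
def loopB (s g : List Char) (i rem : Nat) (lim acc : Int) : Int :=
  match rem with
  | 0 => acc + (if s.getD i ' ' = g.getD i ' ' then 0 else 1)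
  | r + 1 =>
    if lim < 0 then acc + (if s.getD i ' ' = g.getD i ' ' then 0 else 1)
    else if s.getD i ' ' ≠ g.getD i ' ' then loopB s g (i + 1) r (lim - 1) (acc + 1)
    else loopB s g (i + 1) r lim acc

def swap_diff_alt (start : String) (goal : String) (limit : Int) : Int :=
  let s := start.toList
  let g := goal.toList
  if s.length = 1 ∨ limit < 0 then
    match s, g with
    | a :: _, b :: _ => if a = b then 0 else 1
    | _, _ => 0
  else
    let m := min s.length g.length
    let acc : Int := (((s.length : Int) - (g.length : Int)).natAbs : Int)
    loopB s g 0 (m - 1) (limit - acc) acc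

-- ===== PRECONDITION & SPEC =====
-- Pre_ excludes exactly the inputs with an empty start or goal, on which A (and B) raise IndexError.
def Pre_swap_diff (start : String) (goal : String) (limit : Int) : Prop :=
  start.toList ≠ [] ∧ goal.toList ≠ []
instance (start : String) (goal : String) (limit : Int) : Decidable (Pre_swap_diff start goal limit) := by unfold Pre_swap_diff; infer_instance

def pvWitness_swap_diff : String × String × Int := ("ab", "ac", 5)

def Spec_swap_diff (start : String) (goal : String) (limit : Int) (out : Int) : Prop := out = swap_diff_alt start goal limit
instance (start : String) (goal : String) (limit : Int) (out : Int) : Decidable (Spec_swap_diff start goal limit out) := by unfold Spec_swap_diff; infer_instance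

-- ===== CLAIM (what is proved, stated in full; the proofs are below) =====
def Claim_equal_swap_diff : Prop := ∀ (start : String) (goal : String) (limit : Int), Dom_swap_diff start goal limit → Pre_swap_diff start goal limit → Spec_swap_diff start goal limit (swap_diff start goal limit)

-- ===== LEMMAS AND PROOFS =====

-- the loop on indices i..i+rem computes A's recursion on the slices s[i:i+rem+1], g[i:i+rem+1]
lemma loopB_eq (s g : List Char) (rem : Nat) :
    ∀ (i : Nat) (lim acc : Int), i + rem + 1 ≤ s.length → i + rem + 1 ≤ g.length →
      loopB s g i rem lim acc = acc + swapA ((s.drop i).take (rem + 1)) ((g.drop i).take (rem + 1)) lim := by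
  induction rem with
  | zero =>
    intro i lim acc hs hg
    have hs' : i < s.length := by omega
    have hg' : i < g.length := by omega
    rw [List.drop_eq_getElem_cons hs', List.drop_eq_getElem_cons hg']
    simp only [List.take_succ_cons, List.take_zero]
    rw [swapA]
    simp [loopB, List.getElem?_eq_getElem hs', List.getElem?_eq_getElem hg']
  | succ r ih =>
    intro i lim acc hs hg
    have hs' : i < s.length := by omega
    have hg' : i < g.length := by omega
    have hsv : s.getD i ' ' = s[i] := by simp [List.getD, List.getElem?_eq_getElem hs']
    have hgv : g.getD i ' ' = g[i] := by simp [List.getD, List.getElem?_eq_getElem hg']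
    rw [List.drop_eq_getElem_cons hs', List.drop_eq_getElem_cons hg']
    simp only [List.take_succ_cons]
    rw [swapA]
    have hls : (s[i] :: (s.drop (i + 1)).take (r + 1)).length = r + 2 := by
      simp [List.length_take]; omega
    have hlg : (g[i] :: (g.drop (i + 1)).take (r + 1)).length = r + 2 := by
      simp [List.length_take]; omega
    by_cases hlim : lim < 0
    · simp [loopB, hls, hlim, List.getElem?_eq_getElem hs', List.getElem?_eq_getElem hg']
    · have hcond : ¬((s[i] :: (s.drop (i + 1)).take (r + 1)).length = 1 ∨ lim < 0) := by
        rw [hls]; omega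
      rw [if_neg hcond, dif_neg (by rw [hls, hlg]; simp)]
      by_cases heq : s[i] = g[i]
      · simp only [loopB, hsv, hgv, heq, if_neg hlim, ne_eq, not_true_eq_false, if_false, if_true]
        rw [ih (i + 1) lim acc (by omega) (by omega)]
      · simp only [loopB, hsv, hgv, heq, if_neg hlim, ne_eq, not_false_eq_true, if_true, if_false]
        rw [ih (i + 1) (lim - 1) (acc + 1) (by omega) (by omega)]
        ring

-- ===== VERDICT (by name: the statement is the Claim_ definition above) =====
theorem swap_diff_spec : Claim_equal_swap_diff := by
  intro start goal limit _ hpre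
  obtain ⟨hs, hg⟩ := hpre
  unfold Spec_swap_diff swap_diff swap_diff_alt
  obtain ⟨a, s', hS⟩ := List.exists_cons_of_ne_nil hs
  obtain ⟨b, g', hG⟩ := List.exists_cons_of_ne_nil hg
  rw [hS, hG]
  have hls : (a :: s').length = s'.length + 1 := by simp
  have hlg : (b :: g').length = g'.length + 1 := by simp
  by_cases hbase : (a :: s').length = 1 ∨ limit < 0
  · rw [swapA, if_pos hbase]
    by_cases hab : a = b <;> simp [hab] <;>
      · intro h1 _
        rcases hbase with h | h
        · exact absurd (by simpa using h) h1
        · omega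
  · rw [swapA, if_neg hbase]
    simp only [if_neg hbase]
    set m := min (a :: s').length (b :: g').length with hm
    set d : Int := ((((a :: s').length : Int) - ((b :: g').length : Int)).natAbs : Int) with hd
    by_cases hne : (a :: s').length ≠ (b :: g').length
    · rw [dif_pos hne]
      rw [loopB_eq _ _ (m - 1) 0 (limit - d) d (by omega) (by omega)]
      have hm' : m - 1 + 1 = m := by omega
      rw [hm']
      simp [PySem.List.slice_to_natCast]
    · rw [dif_neg hne]
      rw [not_ne_iff] at hne
      have hdz : d = 0 := by simp [hd, hne]
      rw [loopB_eq _ _ (m - 1) 0 (limit - d) d (by omega) (by omega)]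
      have hm' : m - 1 + 1 = m := by omega
      rw [hm', hdz, sub_zero, List.drop_zero, List.drop_zero,
        List.take_of_length_le (by omega), List.take_of_length_le (by omega)]
      conv_rhs => rw [swapA]
      rw [if_neg hbase, dif_neg (by omega)]
      by_cases hab : a = b <;> simp [hab]
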